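-- pv_equiv track=rewrite | github.com/aditya-r-m/coding-competitions-archive | codejam/2010/round_1b/file_fix-it/solution.py | solve
-- ===== SOURCE A (Python) =====
-- def solve(current_paths: list[str], required_paths: list[str]) -> int:
--     count_commands_required, command_required, root = 0, 0, { '': dict() }
--     for paths in [current_paths, required_paths]:
--         for current_path in paths:
--             current_node = root
--             for current_directory in current_path.split('/'):
--                 if current_directory not in current_node:
--                     current_node[current_directory] = dict()
--                     count_commands_required += command_required
--                 current_node = current_node[current_directory]
--         command_required = 1
--     return count_commands_required
-- ===== SOURCE B (Python) =====
-- def solve(current_paths: list[str], required_paths: list[str]) -> int: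
--     # Flat set of cumulative component-prefixes (as tuples) instead of a nested-dict trie.
--     # Seeded with ('',) to mirror the pre-existing '' root child.
--     seen = {('',)}
--     count = 0
--     for cost, paths in ((0, current_paths), (1, required_paths)):
--         for path in paths:
--             prefix = ()
--             for comp in path.split('/'):
--                 prefix = prefix + (comp,)
--                 if prefix not in seen:
--                     seen.add(prefix)
--                     count += cost
--     return count
-- ===== Notes on version B (the rewrite author's own statement) =====
-- stated objective: simpler
-- what changed: Replaces the nested-dict trie and node-by-node descent with a single flat set of cumulative component-prefix tuples (seeded with ('',)), counting a new prefix at cost 0 for current paths and 1 for required paths.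
import Mathlib
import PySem

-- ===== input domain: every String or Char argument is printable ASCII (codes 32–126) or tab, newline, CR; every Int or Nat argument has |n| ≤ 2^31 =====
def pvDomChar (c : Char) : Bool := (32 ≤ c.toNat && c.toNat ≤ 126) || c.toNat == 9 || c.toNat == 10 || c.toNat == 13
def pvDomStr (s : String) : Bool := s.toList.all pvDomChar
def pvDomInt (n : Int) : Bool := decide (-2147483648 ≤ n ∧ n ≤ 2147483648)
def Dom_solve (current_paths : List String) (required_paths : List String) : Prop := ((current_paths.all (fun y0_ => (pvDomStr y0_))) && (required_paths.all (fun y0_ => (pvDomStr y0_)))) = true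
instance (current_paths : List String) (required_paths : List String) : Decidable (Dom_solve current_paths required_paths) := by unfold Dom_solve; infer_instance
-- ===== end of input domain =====

-- B replaces A's nested-dict trie by one flat set of cumulative component-prefix tuples (simpler data structure, same cost).

-- ===== PORT A =====
-- path.split('/'): sep "/" is never "", so split? is always `some`; .getD [] only totalizes.
def pySplitSlash (s : String) : List String := (PySem.Str.split? s "/").getD []

-- A's nested Python dict-of-dicts, keyed by str: an assoc list (insertion order) whose values are dicts
inductive PyD : Type
  | nil : PyD
  | cons : String → PyD → PyD → PyD

-- 'current_directory in current_node' / 'current_node[current_directory]'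
def findT : PyD → String → Option PyD
  | PyD.nil, _ => none
  | PyD.cons k v r, d => if k = d then some v else findT r d

-- overwrite the value at an existing key, keeping order
def setT : PyD → String → PyD → PyD
  | PyD.nil, _, _ => PyD.nil
  | PyD.cons k t r, d, v => if k = d then PyD.cons k v r else PyD.cons k t (setT r d v)

-- 'current_node[current_directory] = dict()': insert a fresh key at the end
def appT : PyD → String → PyD → PyD
  | PyD.nil, d, v => PyD.cons d v PyD.nil
  | PyD.cons k t r, d, v => PyD.cons k t (appT r d v)

-- the inner 'for current_directory in …' loop: returns the updated dict and the count added
def walkA (cmd : Int) : PyD → List String → PyD × Int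
  | t, [] => (t, 0)
  | t, d :: ds =>
    match findT t d with
    | some child =>
        let r := walkA cmd child ds
        (setT t d r.1, r.2)
    | none =>
        let r := walkA cmd PyD.nil ds
        (appT t d r.1, cmd + r.2)

-- 'for current_path in paths: …'
def runA (cmd : Int) (st : PyD × Int) (paths : List String) : PyD × Int :=
  paths.foldl (fun st path =>
    let r := walkA cmd st.1 (pySplitSlash path)
    (r.1, st.2 + r.2)) st

def solve (current_paths : List String) (required_paths : List String) : Int :=
  let root : PyD := PyD.cons "" PyD.nil PyD.nil
  let st1 := runA 0 (root, 0) current_paths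
  let st2 := runA 1 st1 required_paths
  st2.2

-- ===== PORT B =====
-- inner loop of Source B: state (prefix, seen, count)
def stepB (cost : Int) (st : List String × PySem.Set (List String) × Int) (comp : String) :
    List String × PySem.Set (List String) × Int :=
  let pre := st.1 ++ [comp]
  if PySem.Set.contains st.2.1 pre then (pre, st.2.1, st.2.2)
  else (pre, PySem.Set.add st.2.1 pre, st.2.2 + cost)

def pathB (cost : Int) (st : PySem.Set (List String) × Int) (path : String) :
    PySem.Set (List String) × Int :=
  let r := (pySplitSlash path).foldl (stepB cost) ([], st.1, st.2)
  (r.2.1, r.2.2)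

def solve_alt (current_paths : List String) (required_paths : List String) : Int :=
  let init : PySem.Set (List String) × Int := (PySem.Set.ofList [[""]], 0)
  let st := [((0 : Int), current_paths), (1, required_paths)].foldl
    (fun st p => p.2.foldl (pathB p.1) st) init
  st.2

-- ===== PRECONDITION & SPEC =====
def Spec_solve (current_paths : List String) (required_paths : List String) (out : Int) : Prop := out = solve_alt current_paths required_paths
instance (current_paths : List String) (required_paths : List String) (out : Int) : Decidable (Spec_solve current_paths required_paths out) := by unfold Spec_solve; infer_instance

-- ===== CLAIM (what is proved, stated in full; the proofs are below) =====
def Claim_equal_solve : Prop := ∀ (current_paths : List String) (required_paths : List String), Dom_solve current_paths required_paths → Spec_solve current_paths required_paths (solve current_paths required_paths)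

-- ===== LEMMAS AND PROOFS =====

-- q is the component path of a node of A's nested dict (the root itself for [])
def memT : PyD → List String → Bool
  | _, [] => true
  | t, d :: ds =>
    match findT t d with
    | some c => memT c ds
    | none => false

-- the simulation invariant: the set holds exactly the non-root node paths of the nested dict
def SInv (t : PyD) (seen : PySem.Set (List String)) : Prop :=
  ∀ q : List String, q ≠ [] → (memT t q = true ↔ q ∈ seen)

lemma findT_setT_self (ch : PyD) (d : String) (c v : PyD)
    (h : findT ch d = some c) : findT (setT ch d v) d = some v := by
  induction ch with
  | nil => simp [findT] at h
  | cons k t r iht ihr =>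
    by_cases hk : k = d <;> simp [findT, setT, hk] at h ⊢ <;> simp_all

lemma findT_setT_ne (ch : PyD) (d e : String) (v : PyD) (h : e ≠ d) :
    findT (setT ch d v) e = findT ch e := by
  induction ch with
  | nil => simp [setT]
  | cons k t r iht ihr =>
    by_cases hk : k = d
    · subst hk; simp [findT, setT, h, Ne.symm h]
    · simp [findT, setT, hk, ihr]

lemma findT_appT_self (ch : PyD) (d : String) (v : PyD)
    (h : findT ch d = none) : findT (appT ch d v) d = some v := by
  induction ch with
  | nil => simp [findT, appT]
  | cons k t r iht ihr =>
    by_cases hk : k = d <;> simp [findT, appT, hk] at h ⊢ <;> simp_all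

lemma findT_appT_ne (ch : PyD) (d e : String) (v : PyD) (h : e ≠ d) :
    findT (appT ch d v) e = findT ch e := by
  induction ch with
  | nil => simp [findT, appT, Ne.symm h]
  | cons k t r iht ihr => by_cases hk : k = e <;> simp [findT, appT, hk, ihr]

-- core simulation: A's inner loop on a sub-dict at prefix p matches B's inner fold
lemma walk_sim (cmd : Int) : ∀ (ds : List String) (t : PyD) (p : List String)
    (seen : PySem.Set (List String)) (cnt : Int),
    (∀ q : List String, q ≠ [] → (memT t q = true ↔ (p ++ q) ∈ seen)) →
    (ds.foldl (stepB cmd) (p, seen, cnt)).2.2 = cnt + (walkA cmd t ds).2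
    ∧ (∀ q : List String, q ≠ [] →
        (memT (walkA cmd t ds).1 q = true ↔ (p ++ q) ∈ (ds.foldl (stepB cmd) (p, seen, cnt)).2.1))
    ∧ (∀ x, x ∈ (ds.foldl (stepB cmd) (p, seen, cnt)).2.1 ↔
        x ∈ seen ∨ ∃ n, 0 < n ∧ n ≤ ds.length ∧ x = p ++ ds.take n) := by
  intro ds
  induction ds with
  | nil =>
    intro t p seen cnt H
    refine ⟨by simp [walkA], fun q hq => by simpa using H q hq, fun x => by simp⟩
  | cons d ds ih =>
    intro t p seen cnt H
    have hd := H [d] (by simp)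
    cases hfd : findT t d with
    | some child =>
      have hmem : (p ++ [d]) ∈ seen := by
        rw [← hd]; simp [memT, hfd]
      have hstep : stepB cmd (p, seen, cnt) d = (p ++ [d], seen, cnt) := by
        simp [stepB, PySem.Set.contains_iff, hmem]
      have H' : ∀ q : List String, q ≠ [] → (memT child q = true ↔ ((p ++ [d]) ++ q) ∈ seen) := by
        intro q hq
        have := H (d :: q) (by simp)
        simpa [memT, hfd] using this
      obtain ⟨h1, h2, h3⟩ := ih child (p ++ [d]) seen cnt H'
      refine ⟨?_, ?_, ?_⟩
      · simp only [List.foldl_cons, hstep, walkA, hfd]; exact h1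
      · intro q hq
        simp only [List.foldl_cons, hstep, walkA, hfd]
        obtain ⟨e, qs, rfl⟩ : ∃ e qs, q = e :: qs := by
          cases q with | nil => exact absurd rfl hq | cons e qs => exact ⟨e, qs, rfl⟩
        by_cases he : e = d
        · subst he
          rw [show memT (setT t e (walkA cmd child ds).1) (e :: qs)
              = memT (walkA cmd child ds).1 qs by
            simp [memT, findT_setT_self t e child _ hfd]]
          cases qs with
          | nil =>
            simp only [memT]
            constructor
            · intro _
              have := (h3 (p ++ [e])).2 (Or.inl hmem)
              simpa using this
            · intro _; trivial
          | cons f fs =>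
            have := h2 (f :: fs) (by simp)
            simpa using this
        · rw [show memT (setT t d (walkA cmd child ds).1) (e :: qs)
              = memT t (e :: qs) by
            simp [memT, findT_setT_ne t d e _ he]]
          rw [H (e :: qs) (by simp)]
          rw [h3 (p ++ e :: qs)]
          constructor
          · exact Or.inl
          · rintro (h | ⟨n, hn0, hnl, heq⟩)
            · exact h
            · exfalso
              have : e :: qs = d :: ds.take n := by
                rw [List.append_assoc] at heq
                simpa using List.append_cancel_left heq
              exact he (by injection this)
      · intro x
        simp only [List.foldl_cons, hstep, walkA, hfd]
        rw [h3 x]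
        constructor
        · rintro (h | ⟨n, hn0, hnl, rfl⟩)
          · exact Or.inl h
          · exact Or.inr ⟨n + 1, by omega, by simp; omega, by simp [List.append_assoc]⟩
        · rintro (h | ⟨n, hn0, hnl, rfl⟩)
          · exact Or.inl h
          · cases n with
            | zero => omega
            | succ m =>
              cases m with
              | zero => exact Or.inl (by simpa using hmem)
              | succ k =>
                exact Or.inr ⟨k + 1, by omega, by simp at hnl ⊢; omega,
                  by simp [List.append_assoc]⟩
    | none =>
      have hnmem : (p ++ [d]) ∉ seen := by
        intro h
        have := hd.2 h
        simp [memT, hfd] at this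
      have hstep : stepB cmd (p, seen, cnt) d
          = (p ++ [d], PySem.Set.add seen (p ++ [d]), cnt + cmd) := by
        simp [stepB, PySem.Set.contains_iff, hnmem]
      have H' : ∀ q : List String, q ≠ [] →
          (memT PyD.nil q = true ↔ ((p ++ [d]) ++ q) ∈ PySem.Set.add seen (p ++ [d])) := by
        intro q hq
        obtain ⟨e, qs, rfl⟩ : ∃ e qs, q = e :: qs := by
          cases q with | nil => exact absurd rfl hq | cons e qs => exact ⟨e, qs, rfl⟩
        simp only [memT, findT]
        rw [PySem.Set.mem_add]
        constructor
        · intro h; cases h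
        · rintro (h | h)
          · exfalso
            have h2 := H (d :: e :: qs) (by simp)
            rw [show p ++ d :: e :: qs = (p ++ [d]) ++ e :: qs by simp] at h2
            have := h2.2 h
            simp [memT, hfd] at this
          · exfalso
            have : ((p ++ [d]) ++ e :: qs).length = (p ++ [d]).length := by rw [h]
            simp at this
      obtain ⟨h1, h2, h3⟩ := ih PyD.nil (p ++ [d])
        (PySem.Set.add seen (p ++ [d])) (cnt + cmd) H'
      refine ⟨?_, ?_, ?_⟩
      · simp only [List.foldl_cons, hstep, walkA, hfd]
        rw [h1]; ring
      · intro q hq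
        simp only [List.foldl_cons, hstep, walkA, hfd]
        obtain ⟨e, qs, rfl⟩ : ∃ e qs, q = e :: qs := by
          cases q with | nil => exact absurd rfl hq | cons e qs => exact ⟨e, qs, rfl⟩
        by_cases he : e = d
        · subst he
          rw [show memT (appT t e (walkA cmd PyD.nil ds).1) (e :: qs)
              = memT (walkA cmd PyD.nil ds).1 qs by
            simp [memT, findT_appT_self t e _ hfd]]
          cases qs with
          | nil =>
            simp only [memT]
            constructor
            · intro _
              have := (h3 (p ++ [e])).2 (Or.inl (by rw [PySem.Set.mem_add]; exact Or.inr rfl))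
              simpa using this
            · intro _; trivial
          | cons f fs =>
            have := h2 (f :: fs) (by simp)
            simpa using this
        · rw [show memT (appT t d (walkA cmd PyD.nil ds).1) (e :: qs)
              = memT t (e :: qs) by
            simp [memT, findT_appT_ne t d e _ he]]
          rw [H (e :: qs) (by simp)]
          rw [h3 (p ++ e :: qs)]
          rw [PySem.Set.mem_add]
          constructor
          · exact fun h => Or.inl (Or.inl h)
          · rintro ((h | h) | ⟨n, hn0, hnl, heq⟩)
            · exact h
            · exfalso
              have : (p ++ e :: qs).length = (p ++ [d]).length := by rw [h]
              simp at this
              subst this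
              have := List.append_cancel_left h
              exact he (by injection this)
            · exfalso
              have : e :: qs = d :: ds.take n := by
                rw [List.append_assoc] at heq
                simpa using List.append_cancel_left heq
              exact he (by injection this)
      · intro x
        simp only [List.foldl_cons, hstep, walkA, hfd]
        rw [h3 x, PySem.Set.mem_add]
        constructor
        · rintro ((h | h) | ⟨n, hn0, hnl, rfl⟩)
          · exact Or.inl h
          · exact Or.inr ⟨1, by omega, by simp, by simp [h]⟩
          · exact Or.inr ⟨n + 1, by omega, by simp; omega, by simp [List.append_assoc]⟩
        · rintro (h | ⟨n, hn0, hnl, rfl⟩)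
          · exact Or.inl (Or.inl h)
          · cases n with
            | zero => omega
            | succ m =>
              cases m with
              | zero => exact Or.inl (Or.inr (by simp))
              | succ k =>
                exact Or.inr ⟨k + 1, by omega, by simp at hnl ⊢; omega,
                  by simp [List.append_assoc]⟩

-- one path: A's update of (dict, count) matches B's update of (seen, count)
lemma path_sim (cmd : Int) (t : PyD) (seen : PySem.Set (List String)) (cnt : Int)
    (path : String) (H : SInv t seen) :
    (pathB cmd (seen, cnt) path).2 = cnt + (walkA cmd t (pySplitSlash path)).2
    ∧ SInv (walkA cmd t (pySplitSlash path)).1 (pathB cmd (seen, cnt) path).1 := by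
  obtain ⟨h1, h2, _⟩ := walk_sim cmd (pySplitSlash path) t [] seen cnt (by simpa [SInv] using H)
  exact ⟨h1, fun q hq => by simpa using h2 q hq⟩

-- one pass: folding a list of paths
lemma run_sim (cmd : Int) : ∀ (paths : List String) (t : PyD)
    (seen : PySem.Set (List String)) (cnt : Int), SInv t seen →
    (paths.foldl (pathB cmd) (seen, cnt)).2 = (runA cmd (t, cnt) paths).2
    ∧ SInv (runA cmd (t, cnt) paths).1 (paths.foldl (pathB cmd) (seen, cnt)).1 := by
  intro paths
  induction paths with
  | nil => intro t seen cnt H; exact ⟨rfl, H⟩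
  | cons path rest ih =>
    intro t seen cnt H
    obtain ⟨h1, h2⟩ := path_sim cmd t seen cnt path H
    have hrec := ih (walkA cmd t (pySplitSlash path)).1 (pathB cmd (seen, cnt) path).1
      (cnt + (walkA cmd t (pySplitSlash path)).2) h2
    have e1 : (path :: rest).foldl (pathB cmd) (seen, cnt)
        = rest.foldl (pathB cmd) (pathB cmd (seen, cnt) path) := List.foldl_cons ..
    have e2 : runA cmd (t, cnt) (path :: rest)
        = runA cmd ((walkA cmd t (pySplitSlash path)).1,
            cnt + (walkA cmd t (pySplitSlash path)).2) rest := by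
      simp only [runA, List.foldl_cons]
    rw [e1, e2, show (pathB cmd (seen, cnt) path)
        = ((pathB cmd (seen, cnt) path).1, cnt + (walkA cmd t (pySplitSlash path)).2) by
      rw [← h1]]
    exact hrec

lemma sinv_init : SInv (PyD.cons "" PyD.nil PyD.nil) (PySem.Set.ofList [[""]]) := by
  intro q hq
  obtain ⟨e, qs, rfl⟩ : ∃ e qs, q = e :: qs := by
    cases q with | nil => exact absurd rfl hq | cons e qs => exact ⟨e, qs, rfl⟩
  by_cases he : e = ""
  · subst he
    cases qs with
    | nil => simp [memT, findT, PySem.Set.ofList, PySem.Set.add, PySem.Set.contains, PySem.Set.empty]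
    | cons f fs =>
      simp [memT, findT, PySem.Set.ofList, PySem.Set.add, PySem.Set.contains, PySem.Set.empty]
  · simp [memT, findT, he, PySem.Set.ofList, PySem.Set.add, PySem.Set.contains, PySem.Set.empty,
      Ne.symm he]

-- ===== VERDICT (by name: the statement is the Claim_ definition above) =====
theorem solve_spec : Claim_equal_solve := by
  intro current_paths required_paths _
  unfold Spec_solve solve solve_alt
  simp only [List.foldl_cons, List.foldl_nil]
  obtain ⟨h1, h2⟩ := run_sim 0 current_paths (PyD.cons "" PyD.nil PyD.nil)
    (PySem.Set.ofList [[""]]) 0 sinv_init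
  obtain ⟨g1, g2⟩ := run_sim 1 required_paths
    (runA 0 (PyD.cons "" PyD.nil PyD.nil, 0) current_paths).1
    (current_paths.foldl (pathB 0) (PySem.Set.ofList [[""]], 0)).1
    (runA 0 (PyD.cons "" PyD.nil PyD.nil, 0) current_paths).2 h2
  rw [show (current_paths.foldl (pathB 0) (PySem.Set.ofList [[""]], 0))
      = ((current_paths.foldl (pathB 0) (PySem.Set.ofList [[""]], 0)).1,
         (runA 0 (PyD.cons "" PyD.nil PyD.nil, 0) current_paths).2) by
    rw [← h1]]
  rw [g1]
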